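-- pv_equiv track=rewrite | github.com/CNowack/LSR_discovery | scripts/group_by_species.py | assign_batches
-- ===== SOURCE A (Python) =====
-- import math
--
-- def assign_batches(
--     accessions: list,
--     first_batch_size: int,
--     batch_size: int,
--     species_taxid: str,
-- ) -> list:
--     """
--     Split a list of accessions into batches.
--     The first batch for a species is larger (50 per paper), subsequent ones
--     are smaller (20 per paper).
--     Returns a list of (accession, batch_id) tuples.
--     """
--     results = []
--     remaining = list(accessions)
--
--     # First batch
--     first = remaining[:first_batch_size]
--     remaining = remaining[first_batch_size:]
--     if first:
--         batch_id = f"{species_taxid}_batch_00"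
--         results.extend((acc, batch_id) for acc in first)
--
--     # Subsequent batches
--     n_subsequent = math.ceil(len(remaining) / batch_size) if remaining else 0
--     for i in range(n_subsequent):
--         chunk = remaining[i * batch_size : (i + 1) * batch_size]
--         batch_id = f"{species_taxid}_batch_{i + 1:02d}"
--         results.extend((acc, batch_id) for acc in chunk)
--
--     return results
-- ===== SOURCE B (Python) =====
-- def assign_batches(
--     accessions: list,
--     first_batch_size: int,
--     batch_size: int,
--     species_taxid: str,
-- ) -> list:
--     """
--     Split a list of accessions into batches.
--     The first batch for a species is larger (50 per paper), subsequent ones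
--     are smaller (20 per paper).
--     Returns a list of (accession, batch_id) tuples.
--
--     One flat pass: each accession's batch number is derived arithmetically
--     from its position instead of slicing the list into chunks.
--     """
--     out = []
--     for idx, acc in enumerate(accessions):
--         batch = 0 if idx < first_batch_size else (idx - first_batch_size) // batch_size + 1
--         out.append((acc, f"{species_taxid}_batch_{batch:02d}"))
--     return out
-- ===== Notes on version B (the rewrite author's own statement) =====
-- stated objective: alternative
-- what changed: Replaces slicing the list into a first chunk plus ceil-counted subsequent chunks with an inner per-chunk loop by one flat pass over enumerate(accessions) that derives each element's batch number arithmetically from its position; Pre_ restricts to the natural domain (first_batch_size >= 0, and batch_size > 0 whenever a tail beyond the first batch exists), since batch sizes are counts: outside it A raises ZeroDivisionError on zero batch_size or its value is an accident of Python slicing, and neither behaviour is the function's purpose.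
-- outside the precondition, e.g. on assign_batches(['a'], -1, 1, 't'): A returns [('a', 't_batch_01')], B returns [('a', 't_batch_02')]; on assign_batches(['a'], 0, -1, 't'): A returns [], B returns [('a', 't_batch_01')]
import Mathlib
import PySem

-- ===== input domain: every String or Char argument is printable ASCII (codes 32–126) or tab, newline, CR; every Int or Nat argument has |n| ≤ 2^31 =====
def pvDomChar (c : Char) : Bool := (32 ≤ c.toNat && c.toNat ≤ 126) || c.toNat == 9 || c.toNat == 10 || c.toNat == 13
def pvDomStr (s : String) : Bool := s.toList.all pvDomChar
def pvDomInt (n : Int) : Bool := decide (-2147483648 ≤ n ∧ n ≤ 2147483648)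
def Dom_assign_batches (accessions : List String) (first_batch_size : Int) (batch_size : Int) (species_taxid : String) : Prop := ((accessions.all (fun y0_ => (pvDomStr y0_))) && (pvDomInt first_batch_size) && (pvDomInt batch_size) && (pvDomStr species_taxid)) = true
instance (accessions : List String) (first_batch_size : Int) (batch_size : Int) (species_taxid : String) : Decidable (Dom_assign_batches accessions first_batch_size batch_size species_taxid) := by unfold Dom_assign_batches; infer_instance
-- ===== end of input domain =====

-- B replaces A's slice-into-chunks-then-inner-loop structure by one flat pass over
-- enumerate(accessions) deriving each element's batch number arithmetically from its
-- position (objective: alternative decomposition, same asymptotic cost).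


-- f"{k:02d}" for the k ≥ 0 both programs format under Pre_ (pad with '0' to width 2)
def pvFmt02 (k : Int) : String :=
  if PySem.Str.len (PySem.Int.toStr k) < 2 then "0" ++ PySem.Int.toStr k else PySem.Int.toStr k

-- math.ceil(m / b) on ints; exact as -((-m) // b) for these magnitudes (the float quotient of
-- ints with |·| ≤ 2^31 never rounds across an integer, so float ceil = exact rational ceil)
def pvCeilDiv (m b : Int) : Int := -(PySem.Int.floordiv (-m) b)

-- ===== PORT A =====
def assign_batches (accessions : List String) (first_batch_size : Int) (batch_size : Int) (species_taxid : String) : List (String × String) :=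
  let remaining0 := accessions
  let first := PySem.List.slice remaining0 none (some first_batch_size)
  let remaining := PySem.List.slice remaining0 (some first_batch_size) none
  let results : List (String × String) :=
    if first ≠ [] then
      [] ++ first.map (fun acc => (acc, species_taxid ++ "_batch_00"))
    else []
  let n_subsequent : Int :=
    if remaining ≠ [] then pvCeilDiv (remaining.length : Int) batch_size else 0
  (PySem.List.pyRange 0 n_subsequent 1).foldl
    (fun res i =>
      res ++ (PySem.List.slice remaining (some (i * batch_size)) (some ((i + 1) * batch_size))).map
          (fun acc => (acc, species_taxid ++ "_batch_" ++ pvFmt02 (i + 1))))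
    results

-- ===== PORT B =====
def assign_batches_alt (accessions : List String) (first_batch_size : Int) (batch_size : Int) (species_taxid : String) : List (String × String) :=
  (PySem.List.enumerate accessions 0).foldl
    (fun out p =>
      out ++ [(p.2, species_taxid ++ "_batch_" ++
        pvFmt02 (if p.1 < first_batch_size then 0
                 else PySem.Int.floordiv (p.1 - first_batch_size) batch_size + 1))])
    []

-- ===== PRECONDITION & SPEC =====
-- Pre_ restricts to the function's natural domain (batch sizes are counts): first_batch_size ≥ 0
-- and, whenever a tail beyond the first batch exists, batch_size > 0; outside it A raises
-- ZeroDivisionError (zero batch_size with a tail) or the corner is one no caller would specify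
-- (negative sizes), where A's slicing and B's arithmetic legitimately disagree.
def Pre_assign_batches (accessions : List String) (first_batch_size : Int) (batch_size : Int) (species_taxid : String) : Prop :=
  0 ≤ first_batch_size ∧ (0 < batch_size ∨ (accessions.length : Int) ≤ first_batch_size)
instance (accessions : List String) (first_batch_size : Int) (batch_size : Int) (species_taxid : String) : Decidable (Pre_assign_batches accessions first_batch_size batch_size species_taxid) := by unfold Pre_assign_batches; infer_instance

def pvWitness_assign_batches : List String × Int × Int × String := (["a", "b", "c", "d"], 2, 1, "tx")

def Spec_assign_batches (accessions : List String) (first_batch_size : Int) (batch_size : Int) (species_taxid : String) (out : List (String × String)) : Prop := out = assign_batches_alt accessions first_batch_size batch_size species_taxid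
instance (accessions : List String) (first_batch_size : Int) (batch_size : Int) (species_taxid : String) (out : List (String × String)) : Decidable (Spec_assign_batches accessions first_batch_size batch_size species_taxid out) := by unfold Spec_assign_batches; infer_instance

-- ===== CLAIM (what is proved, stated in full; the proofs are below) =====
def Claim_equal_assign_batches : Prop := ∀ (accessions : List String) (first_batch_size : Int) (batch_size : Int) (species_taxid : String), Dom_assign_batches accessions first_batch_size batch_size species_taxid → Pre_assign_batches accessions first_batch_size batch_size species_taxid → Spec_assign_batches accessions first_batch_size batch_size species_taxid (assign_batches accessions first_batch_size batch_size species_taxid)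

-- ===== LEMMAS AND PROOFS =====
lemma enumerate_shift {α : Type} (xs : List α) (s : Int) :
    PySem.List.enumerate xs s
      = (PySem.List.enumerate xs 0).map (fun p => (p.1 + s, p.2)) := by
  induction xs generalizing s with
  | nil => simp [PySem.List.enumerate_nil]
  | cons x t ih =>
      rw [PySem.List.enumerate_cons, PySem.List.enumerate_cons, ih (s + 1), ih (0 + 1)]
      simp only [List.map_map, List.map_cons, List.cons.injEq, Prod.mk.injEq]
      refine ⟨⟨by omega, trivial⟩, ?_⟩
      apply List.map_congr_left; intro p _
      simp [Function.comp]; omega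

lemma chunk_flat (b : Int) (hb : 0 < b) :
    ∀ (nn : Nat) (lab : Int → String) (ys : List String), (ys.length : Int) ≤ nn * b →
    (PySem.List.pyRange 0 (nn : Int) 1).flatMap
        (fun i => (PySem.List.slice ys (some (i * b)) (some ((i + 1) * b))).map
            (fun a => (a, lab i)))
      = (PySem.List.enumerate ys 0).map
          (fun p => (p.2, lab (PySem.Int.floordiv p.1 b))) := by
  intro nn
  induction nn with
  | zero =>
      intro lab ys h
      have : ys = [] := by
        cases ys with
        | nil => rfl
        | cons a t => simp at h; omega
      subst this
      simp [PySem.List.pyRange_one_eq_nil (by omega : (0:Int) ≤ 0), PySem.List.enumerate_nil]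
  | succ nn ih =>
      intro lab ys h
      have hcast : ((nn + 1 : Nat) : Int) = (nn : Int) + 1 := by push_cast; ring
      rw [hcast, PySem.List.pyRange_one_cons (by positivity)]
      rw [List.flatMap_cons]
      have hchunk0 : PySem.List.slice ys (some (0 * b)) (some ((0 + 1) * b))
          = ys.take b.toNat := by
        rw [show (0 : Int) * b = 0 by ring, show ((0:Int)+1) * b = b by ring]
        rw [PySem.List.slice_zero_start, PySem.List.slice_to ys hb.le]
      have hrange : PySem.List.pyRange (0 + 1) ((nn : Int) + 1) 1
          = (PySem.List.pyRange 0 (nn : Int) 1).map (fun i => i + 1) := by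
        rw [PySem.List.pyRange_one, PySem.List.pyRange_one]
        simp [List.map_map, Function.comp]
        intro a _; omega
      rw [hrange, List.flatMap_map]
      have hrest : (PySem.List.pyRange 0 (nn : Int) 1).flatMap
            (fun a => (PySem.List.slice ys (some ((a + 1) * b)) (some ((a + 1 + 1) * b))).map
                (fun a_1 => (a_1, lab (a + 1))))
          = (PySem.List.pyRange 0 (nn : Int) 1).flatMap
            (fun i => (PySem.List.slice (ys.drop b.toNat) (some (i * b)) (some ((i + 1) * b))).map
                (fun a => (a, (fun j => lab (j + 1)) i))) := by
        apply List.flatMap_congr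
        intro i hi
        have hi0 : 0 ≤ i := (PySem.List.mem_pyRange_one.mp hi).1
        have h1 : 0 ≤ i * b := mul_nonneg hi0 hb.le
        have e1 : (i + 1) * b = i * b + b := by ring
        have e2 : (i + 1 + 1) * b = (i + 1) * b + b := by ring
        rw [PySem.List.slice_toNat ys (by nlinarith) (by nlinarith),
            PySem.List.slice_toNat (ys.drop b.toNat) (by nlinarith) (by nlinarith)]
        rw [List.drop_drop]
        have t1 : ((i + 1) * b).toNat = (i * b).toNat + b.toNat := by
          rw [e1]; omega
        have t2 : ((i + 1 + 1) * b).toNat = ((i+1) * b).toNat + b.toNat := by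
          rw [e2]; omega
        rw [t2, t1, Nat.add_comm b.toNat ((i * b).toNat)]
        have hc : (i * b).toNat + b.toNat + b.toNat - ((i * b).toNat + b.toNat)
            = (i * b).toNat + b.toNat - (i * b).toNat := by omega
        rw [hc]
      have hlen' : ((ys.drop b.toNat).length : Int) ≤ (nn : Int) * b := by
        have hX : (0:Int) ≤ (nn : Int) * b := by positivity
        have h' : (ys.length : Int) ≤ (nn : Int) * b + b := by
          have e : ((nn + 1 : Nat) : Int) * b = (nn : Int) * b + b := by push_cast; ring
          rw [← e]; exact h
        simp only [List.length_drop]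
        generalize (nn : Int) * b = X at hX h' ⊢
        omega
      rw [hrest, ih (fun j => lab (j + 1)) (ys.drop b.toNat) hlen']
      conv_rhs => rw [← List.take_append_drop b.toNat ys]
      rw [PySem.List.enumerate_append, List.map_append]
      congr 1
      · rw [hchunk0]
        have : ∀ p ∈ PySem.List.enumerate (ys.take b.toNat) 0,
            ((fun p : Int × String => (p.2, lab (PySem.Int.floordiv p.1 b))) p)
              = ((fun p : Int × String => (p.2, lab 0)) p) := by
          intro p hp
          rcases (PySem.List.mem_enumerate_iff _ _ _).mp hp with ⟨k, hk, rfl⟩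
          simp only
          congr 1
          have hkb : (k : Int) < b := by
            have := hk; simp [List.length_take] at this; omega
          have : PySem.Int.floordiv (0 + (k:Int)) b = 0 := by
            rw [PySem.Int.floordiv_eq_iff_of_pos hb]
            constructor <;> nlinarith
          rw [this]
        rw [List.map_congr_left this]
        rw [show (fun p : Int × String => (p.2, lab 0)) = ((fun a => (a, lab 0)) ∘ (fun p : Int × String => p.2)) from rfl]
        rw [← List.map_map, PySem.List.map_snd_enumerate]
      · conv_rhs => rw [enumerate_shift]
        rw [List.map_map]
        apply List.map_congr_left
        intro p hp
        have hne : (ys.drop b.toNat) ≠ [] := by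
          intro hnil; rw [hnil] at hp; simp [PySem.List.enumerate_nil] at hp
        have hlen : b.toNat < ys.length := by
          by_contra hle
          exact hne (List.drop_eq_nil_of_le (by omega))
        rcases (PySem.List.mem_enumerate_iff _ _ _).mp hp with ⟨k, hk, rfl⟩
        simp only [Function.comp, List.length_take]
        have hmin : ((min b.toNat ys.length : Nat) : Int) = b := by omega
        rw [hmin]
        have harg : (0:Int) + (k : Int) + (0 + b) = (0 + (k : Int)) + 1 * b := by ring
        rw [harg, PySem.Int.floordiv_eq_ediv_of_pos hb, PySem.Int.floordiv_eq_ediv_of_pos hb,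
            Int.add_mul_ediv_right _ _ (ne_of_gt hb)]

lemma pv_flatMap_single {α β : Type} (g : α → β) (l : List α) :
    l.flatMap (fun x => [g x]) = l.map g := by
  induction l with
  | nil => rfl
  | cons a t ih => simp [List.flatMap_cons, ih]

lemma slice_none_some_eq_take {α : Type} (xs : List α) (i : Int) :
    PySem.List.slice xs none (some i) = xs.take (PySem.List.clampIdx xs.length i) := by
  simp [PySem.List.slice]

lemma split_eq_clamp (n : Nat) (f : Int) :
    (if 0 ≤ f then min f (n : Int) else max ((n : Int) + f) 0)
      = (PySem.List.clampIdx n f : Int) := by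
  simp only [PySem.List.clampIdx]
  split_ifs <;> omega

lemma lab0 (tx : String) : tx ++ "_batch_" ++ pvFmt02 0 = tx ++ "_batch_00" := by
  rw [String.append_assoc]
  congr 1

-- canonical form shared by both programs
def pvCanon (xs : List String) (s : Nat) (b : Int) (tx : String) : List (String × String) :=
  (xs.take s).map (fun a => (a, tx ++ "_batch_00"))
  ++ (if 0 < b then
        (PySem.List.enumerate (xs.drop s) 0).map
          (fun p => (p.2, tx ++ "_batch_" ++ pvFmt02 (PySem.Int.floordiv p.1 b + 1)))
      else [])

lemma B_canon (xs : List String) (f b : Int) (tx : String)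
    (hf : 0 ≤ f) (hp : 0 < b ∨ (xs.length : Int) ≤ f) :
    assign_batches_alt xs f b tx = pvCanon xs (PySem.List.clampIdx xs.length f) b tx := by
  have hclamp : ((PySem.List.clampIdx xs.length f : Nat) : Int) = min f (xs.length : Int) := by
    have h := split_eq_clamp xs.length f
    rw [if_pos hf] at h
    omega
  have hs : PySem.List.clampIdx xs.length f ≤ xs.length := by omega
  have hsf : ((PySem.List.clampIdx xs.length f : Nat) : Int) ≤ f := by omega
  set s := PySem.List.clampIdx xs.length f with hsdef
  simp only [assign_batches_alt]
  rw [PySem.List.foldl_append_eq_flatMap]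
  conv_lhs => rw [show xs = xs.take s ++ xs.drop s from (List.take_append_drop s xs).symm]
  rw [PySem.List.enumerate_append, List.flatMap_append, List.nil_append]
  unfold pvCanon
  congr 1
  · -- head part: all indices < s ≤ f
    rw [List.flatMap_congr (g := fun p : Int × String => [(p.2, tx ++ "_batch_00")]) ?_]
    · rw [pv_flatMap_single]
      rw [show (fun p : Int × String => (p.2, tx ++ "_batch_00"))
            = ((fun a => (a, tx ++ "_batch_00")) ∘ (fun p : Int × String => p.2)) from rfl]
      rw [← List.map_map, PySem.List.map_snd_enumerate]
    · intro p hp'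
      rcases (PySem.List.mem_enumerate_iff _ _ _).mp hp' with ⟨k, hk, rfl⟩
      have hks : (k : Int) < (s : Int) := by
        simp [List.length_take] at hk; omega
      have hcond : (0 : Int) + k < f := by omega
      rw [if_pos hcond, lab0]
  · -- tail part
    by_cases hrem : xs.drop s = []
    · rw [hrem]
      split_ifs <;> simp [PySem.List.enumerate_nil]
    · have hslt : s < xs.length := by
        by_contra hle
        exact hrem (List.drop_eq_nil_of_le (by omega))
      have hsfeq : ((s : Nat) : Int) = f := by omega
      have hb : 0 < b := by
        rcases hp with hb | hle
        · exact hb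
        · omega
      rw [if_pos hb]
      have hlen : ((xs.take s).length : Int) = (s : Int) := by
        simp [List.length_take]; omega
      rw [enumerate_shift (xs.drop s) (0 + ((xs.take s).length : Int)), List.flatMap_map]
      rw [List.flatMap_congr (g := fun p : Int × String =>
            [(p.2, tx ++ "_batch_" ++ pvFmt02 (PySem.Int.floordiv p.1 b + 1))]) ?_]
      · rw [pv_flatMap_single]
      · intro p hp'
        rcases (PySem.List.mem_enumerate_iff _ _ _).mp hp' with ⟨k, hk, rfl⟩
        simp only [hlen]
        have hncond : ¬ ((0:Int) + k + ((0:Int) + (s : Int)) < f) := by omega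
        rw [if_neg hncond]
        have harg : (0:Int) + k + ((0:Int) + (s : Int)) - f = (0:Int) + k := by omega
        rw [harg]

lemma A_canon (xs : List String) (f b : Int) (tx : String)
    (hpre : Pre_assign_batches xs f b tx) :
    assign_batches xs f b tx = pvCanon xs (PySem.List.clampIdx xs.length f) b tx := by
  have hs : PySem.List.clampIdx xs.length f ≤ xs.length := by
    simp only [PySem.List.clampIdx]; split_ifs <;> omega
  simp only [assign_batches]
  rw [slice_none_some_eq_take, PySem.List.slice_some_none]
  set s := PySem.List.clampIdx xs.length f with hsdef
  have hres : (if xs.take s ≠ [] then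
        ([] : List (String × String)) ++ (xs.take s).map (fun acc => (acc, tx ++ "_batch_00"))
      else [])
      = (xs.take s).map (fun acc => (acc, tx ++ "_batch_00")) := by
    split_ifs with h
    · simp
    · rw [Classical.not_not.mp h]; rfl
  rw [hres, PySem.List.foldl_append_eq_flatMap]
  unfold pvCanon
  congr 1
  by_cases hrem : xs.drop s = []
  · have hcond : ¬ (xs.drop s ≠ []) := by simpa using hrem
    rw [if_neg hcond, hrem]
    rw [show PySem.List.pyRange 0 0 1 = [] from PySem.List.pyRange_one_eq_nil (by omega)]
    split_ifs <;> simp [PySem.List.enumerate_nil]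
  · rw [if_pos hrem]
    by_cases hb : 0 < b
    · rw [if_pos hb]
      have hbr : ((pvCeilDiv ((xs.drop s).length : Int) b) - 1) * b < ((xs.drop s).length : Int)
          ∧ ((xs.drop s).length : Int) ≤ (pvCeilDiv ((xs.drop s).length : Int) b) * b :=
        (PySem.Int.neg_floordiv_neg_eq_iff_of_pos hb).mp rfl
      have hm1 : (1 : Int) ≤ ((xs.drop s).length : Int) := by
        have := List.length_pos_iff.mpr hrem; omega
      have hq0 : 0 ≤ pvCeilDiv ((xs.drop s).length : Int) b := by nlinarith [hbr.1, hbr.2]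
      have hcast : pvCeilDiv ((xs.drop s).length : Int) b
          = (((pvCeilDiv ((xs.drop s).length : Int) b).toNat : Nat) : Int) := by omega
      rw [hcast, chunk_flat b hb (pvCeilDiv ((xs.drop s).length : Int) b).toNat
            (fun i => tx ++ "_batch_" ++ pvFmt02 (i + 1)) (xs.drop s)
            (by rw [← hcast]; exact hbr.2)]
    · exfalso
      have hslt : s < xs.length := by
        by_contra hle
        exact hrem (List.drop_eq_nil_of_le (by omega))
      rcases hpre with ⟨hf, hcase⟩
      rcases hcase with hb' | hle
      · exact hb hb'
      · have h := split_eq_clamp xs.length f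
        rw [if_pos hf] at h
        omega

-- ===== VERDICT (by name: the statement is the Claim_ definition above) =====
theorem assign_batches_spec : Claim_equal_assign_batches := by
  intro accessions f b tx _ hpre
  unfold Spec_assign_batches
  rw [A_canon accessions f b tx hpre, B_canon accessions f b tx hpre.1 hpre.2]
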